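-- pv_equiv track=rewrite | github.com/CAMANEM/CE-TEC-2015 | Intro y Taller de Programacion/Examenes/Parciales 2014/III Parcial 2014/III Parcial.py | aux_nota
-- ===== SOURCE A (Python) =====
-- def aux_nota(Vec,MatNotas,Matfinal,i):
--     if len(MatNotas)==len(Matfinal):
--         return Matfinal
--     else:
--         notafinal=mult_vxm(Vec,MatNotas[i][1:],0)
--         if notafinal in range(1,100) or notafinal<=100 :
--             vectemp=[MatNotas[i][0],notafinal]
--             Matfinal.append(vectemp)
--             return aux_nota(Vec,MatNotas,Matfinal,i+1)
--
-- def mult_vxm(Vec,VNotas,result):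
--     if len(Vec)==len(VNotas):
--         if Vec==[]:
--             return result
--         else:
--             multi= Vec[0]*VNotas[0]
--             result=result+multi
--             return mult_vxm(Vec[1:],VNotas[1:],result)
-- ===== SOURCE B (Python) =====
-- def aux_nota(Vec, MatNotas, Matfinal, i):
--     # Count the missing rows up front; one for-loop; dot product via zip/sum.
--     for k in range(len(MatNotas) - len(Matfinal)):
--         row = MatNotas[i + k]
--         Matfinal.append([row[0], sum(v * x for v, x in zip(Vec, row[1:]))])
--     return Matfinal
-- ===== Notes on version B (the rewrite author's own statement) =====
-- stated objective: simpler
-- what changed: Replaced the tail recursion (with its per-call length-equality test) and the recursive mult_vxm helper by a single for-loop over the precomputed number of missing rows with the dot product done inline via zip/sum.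
-- outside the precondition, e.g. on aux_nota([2], [[1, 60]], [], 0): A returns None, B returns [[1, 120]]; on aux_nota([1], [[5, 7], [3, 200]], [], 0): A returns None, B returns [[5, 7], [3, 200]]
import Mathlib
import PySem

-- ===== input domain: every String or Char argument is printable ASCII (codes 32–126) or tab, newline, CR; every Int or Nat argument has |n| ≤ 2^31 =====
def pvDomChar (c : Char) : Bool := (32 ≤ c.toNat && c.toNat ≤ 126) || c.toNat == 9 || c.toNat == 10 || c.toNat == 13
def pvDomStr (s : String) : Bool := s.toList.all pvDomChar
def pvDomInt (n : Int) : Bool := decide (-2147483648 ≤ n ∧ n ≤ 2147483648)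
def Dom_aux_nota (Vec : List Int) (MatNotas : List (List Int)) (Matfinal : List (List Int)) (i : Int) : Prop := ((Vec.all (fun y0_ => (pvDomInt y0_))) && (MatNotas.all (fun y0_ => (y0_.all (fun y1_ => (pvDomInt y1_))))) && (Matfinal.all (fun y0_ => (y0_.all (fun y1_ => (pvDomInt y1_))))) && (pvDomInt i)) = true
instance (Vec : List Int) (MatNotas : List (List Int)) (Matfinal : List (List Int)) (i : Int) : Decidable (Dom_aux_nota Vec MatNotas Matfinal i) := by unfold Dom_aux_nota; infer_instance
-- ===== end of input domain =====

-- B replaces A's tail recursion and recursive mult_vxm helper by one for-loop over the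
-- precomputed number of missing rows with an inline zip/sum dot product (objective: simpler).
-- Both A and B append to the Matfinal argument in place (same mutation); the equivalence
-- proved here is about the return value.

-- ===== PORT A =====
-- mult_vxm returns `none` where the Python helper falls through returning None (length mismatch).
def mult_vxm (Vec : List Int) (VNotas : List Int) (result : Int) : Option Int :=
  if Vec.length = VNotas.length then
    match Vec, VNotas with
    | [], _ => some result
    | _ :: _, [] => none            -- unreachable: lengths are equal
    | v :: vs, x :: xs => mult_vxm vs xs (result + v * x)
  else none                          -- Python returns None here

def aux_nota (Vec : List Int) (MatNotas : List (List Int)) (Matfinal : List (List Int)) (i : Int) : List (List Int) :=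
  if MatNotas.length = Matfinal.length then Matfinal
  else
    match h : PySem.List.pyGet? MatNotas i with
    | none => []                     -- Python: IndexError (excluded by Pre_)
    | some row =>
      match mult_vxm Vec (PySem.List.slice row (some 1) none) 0 with
      | none => []                   -- Python: TypeError on `None <= 100` (excluded by Pre_)
      | some notafinal =>
        if (1 ≤ notafinal ∧ notafinal < 100) ∨ notafinal ≤ 100 then
          aux_nota Vec MatNotas
            (Matfinal ++ [[(PySem.List.pyGet? row 0).getD 0, notafinal]]) (i + 1)
        else []                      -- Python: returns None (excluded by Pre_)
termination_by ((MatNotas.length : Int) - i).toNat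
decreasing_by
  have hr : PySem.Raise.InRange MatNotas.length i := by
    by_contra hc
    rw [← PySem.List.pyGet?_eq_none_iff (xs := MatNotas)] at hc
    simp [hc] at h
  unfold PySem.Raise.InRange at hr
  omega

-- ===== PORT B =====
def aux_nota_alt (Vec : List Int) (MatNotas : List (List Int)) (Matfinal : List (List Int)) (i : Int) : List (List Int) :=
  (List.range (MatNotas.length - Matfinal.length)).foldl
    (fun acc (k : Nat) =>
      let row := (PySem.List.pyGet? MatNotas (i + (k : Int))).getD []
      acc ++ [[(PySem.List.pyGet? row 0).getD 0,
               ((Vec.zip (PySem.List.slice row (some 1) none)).foldl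
                 (fun s p => s + p.1 * p.2) 0)]])
    Matfinal

-- ===== PRECONDITION & SPEC =====
-- Pre_ excludes exactly the inputs where the Python A does not return a list:
-- Matfinal longer than MatNotas (recursion ends in IndexError), a needed row index out of
-- range (IndexError), an empty needed row or one whose length ≠ len(Vec)+1 (IndexError /
-- TypeError via mult_vxm's None), and a needed row whose weighted grade exceeds 100, on
-- which A silently returns None instead of a list.
def Pre_aux_nota (Vec : List Int) (MatNotas : List (List Int)) (Matfinal : List (List Int)) (i : Int) : Prop :=
  Matfinal.length ≤ MatNotas.length ∧
  ∀ k ∈ List.range (MatNotas.length - Matfinal.length),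
    ((PySem.List.pyGet? MatNotas (i + (k : Int))).getD []) ≠ [] ∧
    ((PySem.List.pyGet? MatNotas (i + (k : Int))).getD []).length = Vec.length + 1 ∧
    ((Vec.zip ((PySem.List.pyGet? MatNotas (i + (k : Int))).getD []).tail).map
      (fun p => p.1 * p.2)).sum ≤ 100

instance (Vec : List Int) (MatNotas : List (List Int)) (Matfinal : List (List Int)) (i : Int) : Decidable (Pre_aux_nota Vec MatNotas Matfinal i) := by unfold Pre_aux_nota; infer_instance

def pvWitness_aux_nota : List Int × List (List Int) × List (List Int) × Int :=
  ([1], [[7, 50], [9, 80]], [], 0)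

def Spec_aux_nota (Vec : List Int) (MatNotas : List (List Int)) (Matfinal : List (List Int)) (i : Int) (out : List (List Int)) : Prop := out = aux_nota_alt Vec MatNotas Matfinal i
instance (Vec : List Int) (MatNotas : List (List Int)) (Matfinal : List (List Int)) (i : Int) (out : List (List Int)) : Decidable (Spec_aux_nota Vec MatNotas Matfinal i out) := by unfold Spec_aux_nota; infer_instance

-- ===== CLAIM (what is proved, stated in full; the proofs are below) =====
def Claim_equal_aux_nota : Prop := ∀ (Vec : List Int) (MatNotas : List (List Int)) (Matfinal : List (List Int)) (i : Int), Dom_aux_nota Vec MatNotas Matfinal i → Pre_aux_nota Vec MatNotas Matfinal i → Spec_aux_nota Vec MatNotas Matfinal i (aux_nota Vec MatNotas Matfinal i)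

-- ===== LEMMAS AND PROOFS =====

lemma mult_vxm_eq_sum (Vec : List Int) : ∀ (xs : List Int) (acc : Int),
    Vec.length = xs.length →
    mult_vxm Vec xs acc = some (acc + ((Vec.zip xs).map (fun p => p.1 * p.2)).sum) := by
  induction Vec with
  | nil =>
    intro xs acc h
    rw [mult_vxm, if_pos h]
    simp
  | cons v vs ih =>
    intro xs acc h
    cases xs with
    | nil => simp at h
    | cons x xs' =>
      simp only [List.length_cons] at h
      rw [mult_vxm]
      simp only [List.length_cons, h, if_true]
      rw [ih xs' (acc + v * x) (by omega)]
      simp [List.zip_cons_cons, List.map_cons, List.sum_cons]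
      ring

lemma foldl_dot_eq_sum (l : List (Int × Int)) : ∀ (a : Int),
    l.foldl (fun s p => s + p.1 * p.2) a = a + (l.map (fun p => p.1 * p.2)).sum := by
  induction l with
  | nil => intro a; simp
  | cons p t ih => intro a; simp [List.foldl_cons, ih]; ring

lemma main_equiv (Vec : List Int) (MatNotas : List (List Int)) :
    ∀ (d : Nat) (Matfinal : List (List Int)) (i : Int),
    d = MatNotas.length - Matfinal.length →
    Pre_aux_nota Vec MatNotas Matfinal i →
    aux_nota Vec MatNotas Matfinal i = aux_nota_alt Vec MatNotas Matfinal i := by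
  intro d
  induction d with
  | zero =>
    intro Matfinal i hd hpre
    obtain ⟨hle, _⟩ := hpre
    have heq : MatNotas.length = Matfinal.length := by omega
    rw [aux_nota, if_pos heq]
    unfold aux_nota_alt
    rw [← hd]   -- after hd : 0 = n - m and heq, n - m = 0
    simp
  | succ e ih =>
    intro Matfinal i hd hpre
    obtain ⟨hle, hall⟩ := hpre
    have hlt : Matfinal.length < MatNotas.length := by omega
    have h0 := hall 0 (by rw [← hd]; exact List.mem_range.mpr (Nat.succ_pos e))
    simp only [Nat.cast_zero, add_zero] at h0
    obtain ⟨hne, hlen, hsum⟩ := h0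
    -- the first lookup succeeds
    obtain ⟨row, hrow⟩ : ∃ row, PySem.List.pyGet? MatNotas i = some row := by
      cases hg : PySem.List.pyGet? MatNotas i with
      | none => rw [hg] at hne; simp at hne
      | some r => exact ⟨r, rfl⟩
    rw [hrow] at hne hlen hsum
    simp only [Option.getD_some] at hne hlen hsum
    -- value of mult_vxm on row[1:]
    have hslice : PySem.List.slice row (some 1) none = row.tail := PySem.List.slice_from_one row
    have hlen' : Vec.length = row.tail.length := by
      rw [List.length_tail]; omega
    have hmv : mult_vxm Vec (PySem.List.slice row (some 1) none) 0 =
        some (((Vec.zip row.tail).map (fun p => p.1 * p.2)).sum) := by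
      rw [hslice, mult_vxm_eq_sum Vec row.tail 0 hlen']; simp
    -- unfold A one step
    rw [aux_nota]
    rw [if_neg (by omega)]
    rw [hrow]
    split
    next hnone => exact absurd hnone (by simp)
    next row1 hsome =>
    injection hsome with h2
    subst h2
    rw [hmv]
    split
    next hx => exact absurd hx (by simp)
    next nf hx =>
    injection hx with h3
    subst h3
    rw [if_pos (Or.inr hsum)]
    -- unfold B one step
    have hcount : MatNotas.length - Matfinal.length = e + 1 := hd.symm
    set v : List Int := [(PySem.List.pyGet? row 0).getD 0,
        ((Vec.zip row.tail).map (fun p => p.1 * p.2)).sum] with hv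
    have hB : aux_nota_alt Vec MatNotas Matfinal i =
        aux_nota_alt Vec MatNotas (Matfinal ++ [v]) (i + 1) := by
      unfold aux_nota_alt
      rw [hcount]
      have hcount' : MatNotas.length - (Matfinal ++ [v]).length = e := by
        simp; omega
      rw [hcount']
      rw [List.range_succ_eq_map, List.foldl_cons, List.foldl_map]
      congr 1
      · funext acc k
        have : i + ((k + 1 : Nat) : Int) = (i + 1) + (k : Int) := by push_cast; ring
        simp only [this]
      · simp only [Nat.cast_zero, add_zero, hrow, Option.getD_some]
        rw [hslice, foldl_dot_eq_sum]
        simp [hv]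
    rw [hB]
    apply ih
    · simp; omega
    · constructor
      · simp; omega
      · intro k hk
        have hk' : k + 1 ∈ List.range (MatNotas.length - Matfinal.length) := by
          simp at hk ⊢; omega
        have := hall (k + 1) hk'
        have hc : i + 1 + (k : Int) = i + ((k + 1 : Nat) : Int) := by push_cast; ring
        rw [hc]
        exact this

-- ===== VERDICT (by name: the statement is the Claim_ definition above) =====
theorem aux_nota_spec : Claim_equal_aux_nota := by
  intro Vec MatNotas Matfinal i _ hpre
  unfold Spec_aux_nota
  exact main_equiv Vec MatNotas (MatNotas.length - Matfinal.length) Matfinal i rfl hpre
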